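-- pv_equiv track=rewrite | github.com/xy200303/automatic-word-summary | toolCore.py | get_info_from_cells
-- ===== SOURCE A (Python) =====
-- def get_info_from_cells(cells_list,key_list):
--     info={}
--     for i in range(len(cells_list)):
--         for key in key_list:
--             if key==cells_list[i]:
--                 if i+1>=len(cells_list):
--                     index=i
--                 else:
--                     index=i+1
--                 info[key]=cells_list[index]
--     return info
-- ===== SOURCE B (Python) =====
-- def get_info_from_cells(cells_list, key_list):
--     # Build a successor index over the cells in one pass (last occurrence wins),
--     # then keep only the entries whose key is wanted.
--     nextmap = {}
--     n = len(cells_list)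
--     for i, c in enumerate(cells_list):
--         nextmap[c] = cells_list[i + 1] if i + 1 < n else c
--     keys = set(key_list)
--     return {c: v for c, v in nextmap.items() if c in keys}
-- ===== Notes on version B (the rewrite author's own statement) =====
-- stated objective: faster
-- what changed: Replaced A's nested cells-by-keys scan with a single-pass successor dict over the cells followed by a set-filtered comprehension over that dict's items.
import Mathlib
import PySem

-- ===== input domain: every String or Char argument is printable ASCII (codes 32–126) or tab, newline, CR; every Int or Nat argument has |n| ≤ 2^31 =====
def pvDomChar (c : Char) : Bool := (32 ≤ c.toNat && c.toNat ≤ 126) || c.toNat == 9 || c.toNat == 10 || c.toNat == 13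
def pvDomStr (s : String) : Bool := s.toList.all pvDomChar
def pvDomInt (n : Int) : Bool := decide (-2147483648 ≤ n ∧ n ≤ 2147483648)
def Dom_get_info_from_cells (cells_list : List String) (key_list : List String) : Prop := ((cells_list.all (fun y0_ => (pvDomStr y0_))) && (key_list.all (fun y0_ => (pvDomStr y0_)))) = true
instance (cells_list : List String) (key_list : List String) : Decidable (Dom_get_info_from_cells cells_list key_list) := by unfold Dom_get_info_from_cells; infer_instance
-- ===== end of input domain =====

-- B replaces A's nested cells×keys scan by a one-pass successor dict over the cells plus a
-- set-filtered comprehension over its items (objective: faster).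

-- ===== PORT A =====
def get_info_from_cells (cells_list : List String) (key_list : List String) : List (String × String) :=
  (((PySem.List.pyRange 0 (cells_list.length : Int) 1).foldl
      (fun info i =>
        key_list.foldl
          (fun info key =>
            if key == PySem.List.pyGetD cells_list i "" then
              let index : Int := if i + 1 ≥ (cells_list.length : Int) then i else i + 1
              info.insert key (PySem.List.pyGetD cells_list index "")
            else info)
          info)
      (PySem.Dict.empty : PySem.Dict String String))).items

-- ===== PORT B =====
def get_info_from_cells_alt (cells_list : List String) (key_list : List String) : List (String × String) :=
  let n : Int := (cells_list.length : Int)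
  let nextmap : PySem.Dict String String :=
    (PySem.List.enumerate cells_list).foldl
      (fun d ic =>
        d.insert ic.2 (if ic.1 + 1 < n then PySem.List.pyGetD cells_list (ic.1 + 1) ic.2 else ic.2))
      PySem.Dict.empty
  let keys : PySem.Set String := PySem.Set.ofList key_list
  (((nextmap.items.filter (fun cv => PySem.Set.contains keys cv.1)).foldl
      (fun d cv => d.insert cv.1 cv.2) (PySem.Dict.empty : PySem.Dict String String))).items

-- ===== PRECONDITION & SPEC =====
def Spec_get_info_from_cells (cells_list : List String) (key_list : List String) (out : List (String × String)) : Prop := out = get_info_from_cells_alt cells_list key_list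
instance (cells_list : List String) (key_list : List String) (out : List (String × String)) : Decidable (Spec_get_info_from_cells cells_list key_list out) := by unfold Spec_get_info_from_cells; infer_instance

-- ===== CLAIM (what is proved, stated in full; the proofs are below) =====
def Claim_equal_get_info_from_cells : Prop := ∀ (cells_list : List String) (key_list : List String), Dom_get_info_from_cells cells_list key_list → Spec_get_info_from_cells cells_list key_list (get_info_from_cells cells_list key_list)

-- ===== LEMMAS AND PROOFS =====

-- (cell, value-inserted-for-it) pairs, in cell order: each cell paired with its successor,
-- the last cell paired with itself.
def pvNexts : List String → List (String × String)
  | [] => []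
  | [x] => [(x, x)]
  | x :: y :: t => (x, y) :: pvNexts (y :: t)

-- A's inner loop over key_list collapses to a single conditional insert.
lemma pv_inner (ks : List String) (c v : String) :
    ∀ d : PySem.Dict String String,
      ks.foldl (fun info key => if key == c then info.insert key v else info) d
        = if c ∈ ks then d.insert c v else d := by
  induction ks with
  | nil => intro d; simp
  | cons k t ih =>
    intro d
    rw [List.foldl_cons]
    by_cases hk : k = c
    · subst hk
      rw [if_pos (by simp), ih]
      simp [PySem.Dict.insert_insert_self]
    · rw [if_neg (by simp [hk]), ih]
      simp [Ne.symm hk]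

-- A's index loop, after pv_inner, is a conditional-insert fold over pvNexts.
lemma pv_A_fold (cells ks : List String) :
    ∀ (fuel j : Nat) (d : PySem.Dict String String), cells.length - j = fuel →
      (PySem.List.pyRange (j : Int) (cells.length : Int) 1).foldl
        (fun info i =>
          if PySem.List.pyGetD cells i "" ∈ ks then
            info.insert (PySem.List.pyGetD cells i "")
              (PySem.List.pyGetD cells (if i + 1 ≥ (cells.length : Int) then i else i + 1) "")
          else info) d
      = (pvNexts (cells.drop j)).foldl
          (fun d cv => if cv.1 ∈ ks then d.insert cv.1 cv.2 else d) d := by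
  intro fuel
  induction fuel with
  | zero =>
    intro j d h
    have hj : cells.length ≤ j := by omega
    rw [List.drop_eq_nil_iff.mpr (by omega), PySem.List.pyRange_one_eq_nil (by exact_mod_cast hj)]
    simp [pvNexts]
  | succ n ih =>
    intro j d h
    have hj : j < cells.length := by omega
    rw [PySem.List.pyRange_one_cons (by exact_mod_cast hj), List.foldl_cons,
        List.drop_eq_getElem_cons hj]
    have hg : PySem.List.pyGetD cells (j : Int) "" = cells[j] := by
      simp [hj]
    have hcast : ((j : Int) + 1) = ((j + 1 : Nat) : Int) := by push_cast; ring
    by_cases hlast : j + 1 = cells.length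
    · have hge : ((j : Int) + 1 ≥ (cells.length : Int)) := by omega
      rw [if_pos hge] at *
      have hdrop : cells.drop (j + 1) = [] := List.drop_eq_nil_iff.mpr (by omega)
      rw [hdrop]
      rw [PySem.List.pyRange_one_eq_nil (by omega)]
      simp [pvNexts, hg]
    · have hlt : j + 1 < cells.length := by omega
      have hge : ¬ ((j : Int) + 1 ≥ (cells.length : Int)) := by omega
      rw [if_neg hge]
      have hg2 : PySem.List.pyGetD cells ((j + 1 : Nat) : Int) "" = cells[j + 1] := by
        rw [PySem.List.pyGetD_natCast]
        simp [hlt]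
      rw [List.drop_eq_getElem_cons hlt]
      show _ = (pvNexts (cells[j] :: cells[j+1] :: cells.drop (j+1+1))).foldl _ _
      rw [pvNexts, List.foldl_cons, hcast, ih (j+1) _ (by omega), List.drop_eq_getElem_cons hlt]
      rw [hg, hg2]

-- B's enumerate loop is the unconditional-insert fold over pvNexts.
lemma pv_B_fold (cells : List String) :
    ∀ (fuel j : Nat) (d : PySem.Dict String String), cells.length - j = fuel →
      (PySem.List.enumerate (cells.drop j) (j : Int)).foldl
        (fun d ic =>
          d.insert ic.2
            (if ic.1 + 1 < (cells.length : Int) then PySem.List.pyGetD cells (ic.1 + 1) ic.2 else ic.2))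
        d
      = (pvNexts (cells.drop j)).foldl (fun d cv => d.insert cv.1 cv.2) d := by
  intro fuel
  induction fuel with
  | zero =>
    intro j d h
    rw [List.drop_eq_nil_iff.mpr (by omega)]
    simp [pvNexts, PySem.List.enumerate_nil]
  | succ n ih =>
    intro j d h
    have hj : j < cells.length := by omega
    rw [List.drop_eq_getElem_cons hj, PySem.List.enumerate_cons, List.foldl_cons]
    have hcast : ((j : Int) + 1) = ((j + 1 : Nat) : Int) := by push_cast; ring
    by_cases hlast : j + 1 = cells.length
    · have hdrop : cells.drop (j + 1) = [] := List.drop_eq_nil_iff.mpr (by omega)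
      rw [hdrop, if_neg (by omega)]
      simp [pvNexts, PySem.List.enumerate_nil]
    · have hlt : j + 1 < cells.length := by omega
      have hg2 : PySem.List.pyGetD cells ((j + 1 : Nat) : Int) cells[j] = cells[j + 1] := by
        rw [PySem.List.pyGetD_natCast]
        simp [hlt]
      rw [if_pos (by omega)]
      conv_rhs => rw [List.drop_eq_getElem_cons hlt]
      show _ = (pvNexts (cells[j] :: cells[j+1] :: cells.drop (j+1+1))).foldl _ _
      rw [pvNexts, List.foldl_cons, hcast, hg2, ih (j+1) _ (by omega)]
      conv_lhs => rw [List.drop_eq_getElem_cons hlt]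

-- filtering a dict's items commutes with a single insert.
lemma pv_filter_insert (p : String → Bool) (d : PySem.Dict String String) (k v : String) :
    (d.insert k v).items.filter (fun cv => p cv.1)
      = if p k then ((PySem.Dict.mk (d.items.filter (fun cv => p cv.1))).insert k v).items
        else d.items.filter (fun cv => p cv.1) := by
  by_cases hd : d.contains k = true
  · rw [PySem.Dict.items_insert_of_contains _ _ hd]
    have hmap : (d.items.map (fun q => if q.1 == k then (k, v) else q)).filter (fun cv => p cv.1)
        = (d.items.filter (fun cv => p cv.1)).map (fun q => if q.1 == k then (k, v) else q) := by
      rw [List.filter_map]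
      congr 1
      apply List.filter_congr
      intro q _
      by_cases hq : q.1 = k
      · simp [hq]
      · simp [hq]
    rw [hmap]
    by_cases hp : p k = true
    · rw [if_pos hp]
      have hc : (PySem.Dict.mk (d.items.filter (fun cv => p cv.1))).contains k = true := by
        rw [PySem.Dict.contains_iff_mem_keys] at hd ⊢
        simp only [PySem.Dict.keys] at hd ⊢
        simp only [List.mem_map] at hd ⊢
        obtain ⟨q, hq, hqk⟩ := hd
        exact ⟨q, by simp [List.mem_filter, hq, hqk, hp], hqk⟩
      rw [PySem.Dict.items_insert_of_contains _ _ hc]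
    · rw [if_neg hp]
      conv_rhs => rw [← List.map_id (List.filter (fun cv => p cv.1) d.items)]
      apply List.map_congr_left
      intro q hq
      have : p q.1 = true := (List.mem_filter.mp hq).2
      have : q.1 ≠ k := fun h => hp (h ▸ this)
      simp [this]
  · rw [PySem.Dict.items_insert_of_not_contains _ _ (by simpa using hd), List.filter_append]
    by_cases hp : p k = true
    · rw [if_pos hp]
      have hc : (PySem.Dict.mk (d.items.filter (fun cv => p cv.1))).contains k = false := by
        rw [PySem.Dict.contains_iff_mem_keys] at hd
        rw [Bool.eq_false_iff]
        intro h
        rw [PySem.Dict.contains_iff_mem_keys] at h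
        apply hd
        simp only [PySem.Dict.keys, List.mem_map] at h ⊢
        obtain ⟨q, hq, hqk⟩ := h
        exact ⟨q, (List.mem_filter.mp hq).1, hqk⟩
      rw [PySem.Dict.items_insert_of_not_contains _ _ hc]
      simp [hp]
    · rw [if_neg hp]
      simp [hp]

-- filtering after an insert fold = a conditional-insert fold.
lemma pv_main (p : String → Bool) (P : List (String × String)) :
    ∀ d : PySem.Dict String String,
      (P.foldl (fun d cv => d.insert cv.1 cv.2) d).items.filter (fun cv => p cv.1)
        = (P.foldl (fun d cv => if p cv.1 then d.insert cv.1 cv.2 else d)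
            (PySem.Dict.mk (d.items.filter (fun cv => p cv.1)))).items := by
  induction P with
  | nil => intro d; simp
  | cons cv t ih =>
    intro d
    rw [List.foldl_cons, List.foldl_cons, ih]
    congr 1
    apply PySem.Dict.ext
    rw [pv_filter_insert]
    split <;> rfl

-- ===== VERDICT (by name: the statement is the Claim_ definition above) =====
theorem get_info_from_cells_spec : Claim_equal_get_info_from_cells := by
  intro cells ks _
  unfold Spec_get_info_from_cells get_info_from_cells get_info_from_cells_alt
  simp only [pv_inner]
  have hA := pv_A_fold cells ks cells.length 0 PySem.Dict.empty (by omega)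
  simp only [Nat.cast_zero, List.drop_zero] at hA
  rw [hA]
  have hB := pv_B_fold cells cells.length 0 PySem.Dict.empty (by omega)
  simp only [Nat.cast_zero, List.drop_zero] at hB
  rw [hB]
  have hkeys : (((pvNexts cells).foldl (fun d cv => d.insert cv.1 cv.2)
      PySem.Dict.empty).items.map (fun a => a.1)).Nodup := by
    have := PySem.Dict.nodup_keys_foldl_insert_key (pvNexts cells) (fun cv => cv.1)
      (fun _ cv => cv.2) PySem.Dict.empty PySem.Dict.nodup_keys_empty
    simpa [PySem.Dict.keys] using this
  have hfil : ((((pvNexts cells).foldl (fun d cv => d.insert cv.1 cv.2)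
      PySem.Dict.empty).items.filter
        (fun cv => PySem.Set.contains (PySem.Set.ofList ks) cv.1)).map (fun a => a.1)).Nodup :=
    hkeys.sublist (List.Sublist.map _ List.filter_sublist)
  have hfresh := PySem.Dict.items_foldl_insert_fresh
      ((((pvNexts cells).foldl (fun d cv => d.insert cv.1 cv.2) PySem.Dict.empty).items).filter
        (fun cv => PySem.Set.contains (PySem.Set.ofList ks) cv.1))
      (fun a => a.1) (fun a => a.2) PySem.Dict.empty (fun a _ => by simp) hfil
  beta_reduce at hfresh
  rw [hfresh]
  have hemp : (PySem.Dict.empty : PySem.Dict String String).items = [] := rfl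
  rw [hemp, List.nil_append]
  have hmain := pv_main (fun c => PySem.Set.contains (PySem.Set.ofList ks) c) (pvNexts cells)
      PySem.Dict.empty
  beta_reduce at hmain
  rw [hmain]
  have hfun : (fun (d : PySem.Dict String String) (cv : String × String) =>
        if PySem.Set.contains (PySem.Set.ofList ks) cv.1 = true then d.insert cv.1 cv.2 else d)
      = (fun d cv => if cv.1 ∈ ks then d.insert cv.1 cv.2 else d) := by
    funext d cv
    simp [pysem]
  rw [hfun]
  simp only [Prod.mk.eta, List.map_id_fun', id]
  rfl
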